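-- pv_equiv track=rewrite | github.com/ivansbob/1solana-coin-signal-engine | src/replay/chain_backfill.py | _preferred_start_ts
-- ===== SOURCE A (Python) =====
-- def _preferred_start_ts(candidates: list[tuple[str, int]], field_priority: tuple[str, ...]) -> tuple[int | None, str | None]:
--     if not candidates:
--         return None, None
--     for field_name in field_priority:
--         matches = [(path, ts) for path, ts in candidates if path.split(".")[-1] == field_name]
--         if matches:
--             path, ts = min(matches, key=lambda item: item[1])
--             return ts, path
--     path, ts = min(candidates, key=lambda item: item[1])
--     return ts, path
-- ===== SOURCE B (Python) =====
-- def _preferred_start_ts(candidates, field_priority):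
--     if not candidates:
--         return None, None
--     best = {}      # last path segment -> (min ts, its path), first-minimal kept
--     overall = None  # (min ts, its path) over all candidates
--     for path, ts in candidates:
--         f = path.split(".")[-1]
--         cur = best.get(f)
--         if cur is None or ts < cur[0]:
--             best[f] = (ts, path)
--         if overall is None or ts < overall[0]:
--             overall = (ts, path)
--     for f in field_priority:
--         if f in best:
--             return best[f]
--     return overall
-- ===== Notes on version B (the rewrite author's own statement) =====
-- stated objective: faster
-- what changed: Replaced the per-priority-field rescans of the candidate list (one filter + min per field) by a single pass that groups candidates into a dict of per-field running minima (plus an overall running minimum), followed by one scan of the priority list.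
import Mathlib
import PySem

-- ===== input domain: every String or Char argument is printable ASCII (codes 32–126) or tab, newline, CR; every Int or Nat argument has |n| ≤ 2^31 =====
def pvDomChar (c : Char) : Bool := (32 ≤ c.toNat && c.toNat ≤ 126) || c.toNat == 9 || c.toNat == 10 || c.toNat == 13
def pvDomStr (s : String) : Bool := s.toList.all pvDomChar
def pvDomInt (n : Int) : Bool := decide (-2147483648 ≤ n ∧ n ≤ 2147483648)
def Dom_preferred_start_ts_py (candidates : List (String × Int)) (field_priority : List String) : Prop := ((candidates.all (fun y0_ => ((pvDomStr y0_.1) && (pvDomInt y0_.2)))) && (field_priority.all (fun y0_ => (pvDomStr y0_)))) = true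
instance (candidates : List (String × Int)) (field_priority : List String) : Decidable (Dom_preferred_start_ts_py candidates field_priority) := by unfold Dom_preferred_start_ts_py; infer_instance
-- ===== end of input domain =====

-- B replaces A's per-priority-field rescans of the candidate list by one grouping pass
-- (dict of per-field running minima + overall running minimum) and a single priority scan: asymptotically faster.

-- ===== PORT A =====
-- path.split(".")[-1]; split of any string is nonempty, so the [-1] default "" is never used
def pvLastField (p : String) : String :=
  PySem.List.pyGetD ((PySem.Str.split? p ".").getD []) (-1) ""

-- the for-loop over field_priority, with the post-loop fallback min in the base case
def pvALoop (candidates : List (String × Int)) : List String → Option Int × Option String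
  | [] =>
      match PySem.List.min? candidates (fun item => item.2) with
      | some m => (some m.2, some m.1)
      | none => (none, none)
  | field_name :: rest =>
      let ms := candidates.filter (fun pt => pvLastField pt.1 == field_name)
      if ms = [] then pvALoop candidates rest
      else
        match PySem.List.min? ms (fun item => item.2) with
        | some m => (some m.2, some m.1)
        | none => (none, none)

def preferred_start_ts_py (candidates : List (String × Int)) (field_priority : List String) : Option Int × Option String :=
  if candidates = [] then (none, none)
  else pvALoop candidates field_priority

-- ===== PORT B =====
-- one iteration of B's grouping loop: update per-field minimum and overall minimum
def pvBStep (acc : PySem.Dict String (Int × String) × Option (Int × String)) (pt : String × Int) :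
    PySem.Dict String (Int × String) × Option (Int × String) :=
  let f := pvLastField pt.1
  let best :=
    match acc.1.get? f with
    | none => acc.1.insert f (pt.2, pt.1)
    | some cur => if pt.2 < cur.1 then acc.1.insert f (pt.2, pt.1) else acc.1
  let overall :=
    match acc.2 with
    | none => some (pt.2, pt.1)
    | some cur => if pt.2 < cur.1 then some (pt.2, pt.1) else acc.2
  (best, overall)

-- the priority scan, falling back to the overall minimum
def pvBFind (best : PySem.Dict String (Int × String)) (overall : Option (Int × String)) :
    List String → Option Int × Option String
  | [] =>
      match overall with
      | some m => (some m.1, some m.2)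
      | none => (none, none)
  | f :: rest =>
      match best.get? f with
      | some m => (some m.1, some m.2)
      | none => pvBFind best overall rest

def preferred_start_ts_py_alt (candidates : List (String × Int)) (field_priority : List String) : Option Int × Option String :=
  if candidates = [] then (none, none)
  else
    let st := candidates.foldl pvBStep (PySem.Dict.empty, none)
    pvBFind st.1 st.2 field_priority

-- ===== PRECONDITION & SPEC =====
def Spec_preferred_start_ts_py (candidates : List (String × Int)) (field_priority : List String) (out : Option Int × Option String) : Prop := out = preferred_start_ts_py_alt candidates field_priority
instance (candidates : List (String × Int)) (field_priority : List String) (out : Option Int × Option String) : Decidable (Spec_preferred_start_ts_py candidates field_priority out) := by unfold Spec_preferred_start_ts_py; infer_instance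

-- ===== CLAIM (what is proved, stated in full; the proofs are below) =====
def Claim_equal_preferred_start_ts_py : Prop := ∀ (candidates : List (String × Int)) (field_priority : List String), Dom_preferred_start_ts_py candidates field_priority → Spec_preferred_start_ts_py candidates field_priority (preferred_start_ts_py candidates field_priority)

-- ===== LEMMAS AND PROOFS =====

-- B's running-minimum update, abstracted on an optional (ts, path) accumulator
def pvCombine (o : Option (Int × String)) (pt : String × Int) : Option (Int × String) :=
  match o with
  | none => some (pt.2, pt.1)
  | some cur => if pt.2 < cur.1 then some (pt.2, pt.1) else o

def pvSwap (m : String × Int) : Int × String := (m.2, m.1)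

-- folding pvCombine mirrors, through pvSwap, any step function with pvMinStep's equations
theorem pvFold_swap (st : Option (String × Int) → (String × Int) → Option (String × Int))
    (h1 : ∀ x, st none x = some x)
    (h2 : ∀ m x, st (some m) x = if x.2 < m.2 then some x else some m)
    (l : List (String × Int)) :
    ∀ (o : Option (String × Int)),
      l.foldl pvCombine (Option.map pvSwap o) = Option.map pvSwap (l.foldl st o) := by
  induction l with
  | nil => intro o; rfl
  | cons x t ih =>
      intro o
      cases o with
      | none => rw [List.foldl_cons, List.foldl_cons, h1]
                simpa [pvCombine, pvSwap] using ih (some x)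
      | some m =>
          rw [List.foldl_cons, List.foldl_cons, h2]
          by_cases h : x.2 < m.2
          · simpa [pvCombine, pvSwap, h] using ih (some x)
          · simpa [pvCombine, pvSwap, h] using ih (some m)

theorem pvCombine_none_eq_min? (l : List (String × Int)) :
    l.foldl pvCombine none = Option.map pvSwap (PySem.List.min? l (fun item => item.2)) :=
  pvFold_swap _ (fun _ => rfl) (fun _ _ => rfl) l none

-- one step of B's fold, dict component
theorem pvBStep_get? (acc : PySem.Dict String (Int × String) × Option (Int × String))
    (x : String × Int) (f : String) :
    (pvBStep acc x).1.get? f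
      = if pvLastField x.1 == f then pvCombine (acc.1.get? f) x else acc.1.get? f := by
  by_cases h : pvLastField x.1 = f
  · subst h
    cases hc : acc.1.get? (pvLastField x.1) with
    | none => simp [pvBStep, hc, pvCombine, PySem.Dict.get?_insert_self]
    | some cur =>
        by_cases hlt : x.2 < cur.1
        · simp [pvBStep, hc, hlt, pvCombine, PySem.Dict.get?_insert_self]
        · simp [pvBStep, hc, hlt, pvCombine]
  · have hb : (pvLastField x.1 == f) = false := beq_false_of_ne h
    have hne : f ≠ pvLastField x.1 := fun e => h e.symm
    cases hc : acc.1.get? (pvLastField x.1) with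
    | none => simp [pvBStep, hc, hb, PySem.Dict.get?_insert, hne]
    | some cur =>
        by_cases hlt : x.2 < cur.1
        · simp [pvBStep, hc, hlt, hb, PySem.Dict.get?_insert, hne]
        · simp [pvBStep, hc, hlt, hb]

-- the dict component of B's fold holds, per key, the running minimum of the matching candidates
theorem pvBStep_fst (f : String) (l : List (String × Int)) :
    ∀ (acc : PySem.Dict String (Int × String) × Option (Int × String)),
      (l.foldl pvBStep acc).1.get? f
        = (l.filter (fun pt => pvLastField pt.1 == f)).foldl pvCombine (acc.1.get? f) := by
  induction l with
  | nil => intro acc; rfl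
  | cons x t ih =>
      intro acc
      rw [List.foldl_cons, ih (pvBStep acc x), pvBStep_get?, List.filter_cons]
      by_cases hb : (pvLastField x.1 == f) = true
      · simp [hb]
      · simp [hb]

-- the overall component of B's fold is the running minimum of all candidates
theorem pvBStep_snd (l : List (String × Int)) :
    ∀ (acc : PySem.Dict String (Int × String) × Option (Int × String)),
      (l.foldl pvBStep acc).2 = l.foldl pvCombine acc.2 := by
  induction l with
  | nil => intro acc; rfl
  | cons x t ih =>
      intro acc
      have hstep : (pvBStep acc x).2 = pvCombine acc.2 x := by
        cases hc : acc.2 with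
        | none => simp [pvBStep, pvCombine, hc]
        | some cur => by_cases hlt : x.2 < cur.1 <;> simp [pvBStep, pvCombine, hc, hlt]
      rw [List.foldl_cons, List.foldl_cons, ih (pvBStep acc x), hstep]

theorem pvMain (candidates : List (String × Int)) (fp : List String) :
    pvALoop candidates fp
      = pvBFind (candidates.foldl pvBStep (PySem.Dict.empty, none)).1
          (candidates.foldl pvBStep (PySem.Dict.empty, none)).2 fp := by
  induction fp with
  | nil =>
      have hov : (candidates.foldl pvBStep (PySem.Dict.empty, none)).2
          = Option.map pvSwap (PySem.List.min? candidates (fun item => item.2)) := by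
        rw [pvBStep_snd]; simpa using pvCombine_none_eq_min? candidates
      cases hmin : PySem.List.min? candidates (fun item => item.2) with
      | none => simp [pvALoop, pvBFind, hov, hmin]
      | some m => simp [pvALoop, pvBFind, hov, hmin, pvSwap]
  | cons f rest ih =>
      have hget : (candidates.foldl pvBStep (PySem.Dict.empty, none)).1.get? f
          = Option.map pvSwap (PySem.List.min?
              (candidates.filter (fun pt => pvLastField pt.1 == f)) (fun item => item.2)) := by
        rw [pvBStep_fst]
        simpa [PySem.Dict.get?_empty] using
          pvCombine_none_eq_min? (candidates.filter (fun pt => pvLastField pt.1 == f))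
      cases hmin : PySem.List.min? (candidates.filter (fun pt => pvLastField pt.1 == f))
          (fun item => item.2) with
      | none =>
          have hm : candidates.filter (fun pt => pvLastField pt.1 == f) = [] :=
            (PySem.List.min?_eq_none_iff _ _).mp hmin
          have hA : pvALoop candidates (f :: rest) = pvALoop candidates rest := by
            simp [pvALoop, hm]
          have hB : pvBFind (candidates.foldl pvBStep (PySem.Dict.empty, none)).1
                (candidates.foldl pvBStep (PySem.Dict.empty, none)).2 (f :: rest)
              = pvBFind (candidates.foldl pvBStep (PySem.Dict.empty, none)).1
                (candidates.foldl pvBStep (PySem.Dict.empty, none)).2 rest := by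
            simp only [pvBFind, hget, hmin, Option.map_none]
          rw [hA, hB]; exact ih
      | some m =>
          have hm : ¬ candidates.filter (fun pt => pvLastField pt.1 == f) = [] := by
            intro e
            rw [(PySem.List.min?_eq_none_iff _ _).mpr e] at hmin
            exact absurd hmin (by simp)
          have hA : pvALoop candidates (f :: rest) = (some m.2, some m.1) := by
            simp only [pvALoop, if_neg hm, hmin]
          have hB : pvBFind (candidates.foldl pvBStep (PySem.Dict.empty, none)).1
                (candidates.foldl pvBStep (PySem.Dict.empty, none)).2 (f :: rest)
              = (some m.2, some m.1) := by
            simp only [pvBFind, hget, hmin, Option.map_some, pvSwap]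
          rw [hA, hB]

-- ===== VERDICT (by name: the statement is the Claim_ definition above) =====
theorem preferred_start_ts_py_spec : Claim_equal_preferred_start_ts_py := by
  intro candidates field_priority _
  unfold Spec_preferred_start_ts_py preferred_start_ts_py preferred_start_ts_py_alt
  by_cases h : candidates = []
  · simp [h]
  · simp only [h, if_false]
    exact pvMain candidates field_priority
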